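-- pv_equiv track=rewrite | github.com/sysy66/algorithmNotes-caolv | python/6469.重新放置石块.py | relocateMarbles
-- ===== SOURCE A (Python) =====
-- from typing import List
--
-- def relocateMarbles(nums: List[int], moveFrom: List[int], moveTo: List[int]) -> List[int]:
-- 	_in, _out = set(), set()  # in记录会有石头最终到达的位置， out记录搬运过程中此处的石头在后续操作中会被搬走
-- 	ft = list(zip(moveFrom, moveTo))
-- 	for f, t in reversed(ft):
-- 		if t not in _out:
-- 			_in.add(t)
-- 		_out.add(f)
-- 	return sorted(_in | (set(nums) - _out))
-- ===== SOURCE B (Python) =====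
-- def relocateMarbles(nums, moveFrom, moveTo):
--     positions = set(nums)
--     for f, t in zip(moveFrom, moveTo):
--         positions.discard(f)
--         positions.add(t)
--     return sorted(positions)
-- ===== Notes on version B (the rewrite author's own statement) =====
-- stated objective: simpler
-- what changed: B replaces A's backward scan maintaining two auxiliary sets (_in of surviving targets, _out of vacated sources) combined by a final union/difference with a direct forward simulation that keeps one live-position set, discarding each source and adding each target in move order.
import Mathlib
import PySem

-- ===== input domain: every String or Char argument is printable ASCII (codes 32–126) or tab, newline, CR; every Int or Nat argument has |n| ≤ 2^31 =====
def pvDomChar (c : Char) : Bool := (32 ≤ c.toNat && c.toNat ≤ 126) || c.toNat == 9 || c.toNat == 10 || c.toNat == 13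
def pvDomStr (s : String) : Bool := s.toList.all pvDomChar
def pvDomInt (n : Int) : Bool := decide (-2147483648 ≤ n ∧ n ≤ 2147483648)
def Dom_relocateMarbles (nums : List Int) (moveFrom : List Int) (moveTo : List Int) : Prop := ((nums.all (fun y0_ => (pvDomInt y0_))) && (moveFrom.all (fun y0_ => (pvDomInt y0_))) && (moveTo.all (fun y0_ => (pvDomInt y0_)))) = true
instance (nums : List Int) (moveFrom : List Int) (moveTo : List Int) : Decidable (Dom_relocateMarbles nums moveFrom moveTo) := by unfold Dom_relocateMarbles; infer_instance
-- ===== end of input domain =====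

-- B simulates the moves forward with one live-position set instead of A's backward scan with two auxiliary sets; objective: simpler.

-- ===== PORT A =====
-- A's loop body: if t not in _out: _in.add(t); _out.add(f)
def stepA (st : PySem.Set Int × PySem.Set Int) (p : Int × Int) : PySem.Set Int × PySem.Set Int :=
  ((if PySem.Set.contains st.2 p.2 then st.1 else PySem.Set.add st.1 p.2),
   PySem.Set.add st.2 p.1)

-- backward scan over zip(moveFrom, moveTo); state = (_in, _out); return sorted(_in | (set(nums) - _out))
def relocateMarbles (nums : List Int) (moveFrom : List Int) (moveTo : List Int) : List Int :=
  let ft := moveFrom.zip moveTo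
  let st := ft.reverse.foldl stepA (PySem.Set.empty, PySem.Set.empty)
  PySem.List.sorted (PySem.Set.union st.1 (PySem.Set.diff (PySem.Set.ofList nums) st.2)) (fun x => x) false

-- ===== PORT B =====
-- B's loop body: positions.discard(f); positions.add(t)
def stepB (s : PySem.Set Int) (p : Int × Int) : PySem.Set Int :=
  PySem.Set.add (PySem.Set.discard s p.1) p.2

-- forward simulation: positions = set(nums); for f, t in zip(moveFrom, moveTo): discard f then add t; sorted at the end
def relocateMarbles_alt (nums : List Int) (moveFrom : List Int) (moveTo : List Int) : List Int :=
  let positions := (moveFrom.zip moveTo).foldl stepB (PySem.Set.ofList nums)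
  PySem.List.sorted positions (fun x => x) false

-- ===== PRECONDITION & SPEC =====
def Spec_relocateMarbles (nums : List Int) (moveFrom : List Int) (moveTo : List Int) (out : List Int) : Prop := out = relocateMarbles_alt nums moveFrom moveTo
instance (nums : List Int) (moveFrom : List Int) (moveTo : List Int) (out : List Int) : Decidable (Spec_relocateMarbles nums moveFrom moveTo out) := by unfold Spec_relocateMarbles; infer_instance

-- ===== CLAIM (what is proved, stated in full; the proofs are below) =====
def Claim_equal_relocateMarbles : Prop := ∀ (nums : List Int) (moveFrom : List Int) (moveTo : List Int), Dom_relocateMarbles nums moveFrom moveTo → Spec_relocateMarbles nums moveFrom moveTo (relocateMarbles nums moveFrom moveTo)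

-- ===== LEMMAS AND PROOFS =====

-- "x is occupied at the end", reading the move list LAST-move-first (head of r = last move)
def Q (x : Int) (r : List (Int × Int)) (base : Prop) : Prop :=
  match r with
  | [] => base
  | p :: r' => p.2 = x ∨ (p.1 ≠ x ∧ Q x r' base)

theorem memB (x : Int) (l : List (Int × Int)) (s : PySem.Set Int) :
    x ∈ l.foldl stepB s ↔ Q x l.reverse (x ∈ s) := by
  induction l using List.reverseRecOn generalizing s with
  | nil => simp [Q]
  | append_singleton l p ih =>
      simp only [List.foldl_append, List.foldl_cons, List.foldl_nil, List.reverse_append,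
        List.reverse_cons, List.reverse_nil, List.nil_append, List.cons_append, Q]
      rw [stepB, PySem.Set.mem_add, PySem.Set.mem_discard, ih]
      constructor
      · rintro (⟨h, hf⟩ | ht)
        · exact Or.inr ⟨fun hfx => hf hfx.symm, h⟩
        · exact Or.inl ht.symm
      · rintro (ht | ⟨hf, h⟩)
        · exact Or.inr ht.symm
        · exact Or.inl ⟨h, fun hfx => hf hfx.symm⟩

theorem nodupB (l : List (Int × Int)) (s : PySem.Set Int) (hs : s.Nodup) :
    (l.foldl stepB s).Nodup := by
  induction l generalizing s with
  | nil => exact hs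
  | cons p l ih =>
      exact ih _ (PySem.Set.nodup_add _ _ (PySem.Set.nodup_discard _ _ hs))

theorem mainA (x : Int) (N : List Int) (r : List (Int × Int)) :
    ∀ (i o : PySem.Set Int),
      (x ∈ (r.foldl stepA (i, o)).1 ∨ (x ∈ N ∧ x ∉ (r.foldl stepA (i, o)).2))
        ↔ (x ∈ i ∨ (x ∉ o ∧ Q x r (x ∈ N))) := by
  induction r with
  | nil => intro i o; simp [Q]; tauto
  | cons p r ih =>
      intro i o
      rw [List.foldl_cons, stepA, ih]
      have hadd_o : x ∈ PySem.Set.add o p.1 ↔ x ∈ o ∨ x = p.1 := PySem.Set.mem_add _ _ _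
      by_cases hxo : x ∈ o
      · -- x already scheduled to be moved away by an earlier-processed (later) move
        have h1 : (x ∈ (if PySem.Set.contains o p.2 then i else PySem.Set.add i p.2)) ↔ x ∈ i := by
          split
          · exact Iff.rfl
          · rename_i hc
            rw [PySem.Set.mem_add]
            constructor
            · rintro (h | h)
              · exact h
              · exact absurd ((PySem.Set.contains_iff o p.2).mpr (h ▸ hxo)) (by simpa using hc)
            · exact Or.inl
        rw [h1]
        simp [hxo, hadd_o]
      · by_cases hxt : p.2 = x
        · have hc : ¬ (PySem.Set.contains o p.2 = true) := by
            rw [PySem.Set.contains_iff, hxt]; exact hxo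
          rw [if_neg hc]
          simp [PySem.Set.mem_add, hxt, Q, hxo]
        · have h1 : (x ∈ (if PySem.Set.contains o p.2 then i else PySem.Set.add i p.2)) ↔ x ∈ i := by
            split
            · exact Iff.rfl
            · rw [PySem.Set.mem_add]
              constructor
              · rintro (h | h)
                · exact h
                · exact absurd h.symm hxt
              · exact Or.inl
          rw [h1, hadd_o]
          simp only [Q]
          constructor
          · rintro (h | ⟨hno, hq⟩)
            · exact Or.inl h
            · exact Or.inr ⟨hxo, Or.inr ⟨fun h => hno (Or.inr h.symm), hq⟩⟩
          · rintro (h | ⟨-, (ht | ⟨hf, hq⟩)⟩)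
            · exact Or.inl h
            · exact absurd ht hxt
            · exact Or.inr ⟨fun h => (by rcases h with h | h; exact hxo h; exact hf h.symm), hq⟩

theorem nodupA1 (r : List (Int × Int)) :
    ∀ (i o : PySem.Set Int), i.Nodup → (r.foldl stepA (i, o)).1.Nodup := by
  induction r with
  | nil => intro i o hi; exact hi
  | cons p r ih =>
      intro i o hi
      rw [List.foldl_cons, stepA]
      refine ih _ _ ?_
      split
      · exact hi
      · exact PySem.Set.nodup_add _ _ hi

-- ===== VERDICT (by name: the statement is the Claim_ definition above) =====
theorem relocateMarbles_spec : Claim_equal_relocateMarbles := by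
  intro nums moveFrom moveTo _
  unfold Spec_relocateMarbles
  simp only [relocateMarbles, relocateMarbles_alt]
  apply PySem.List.sorted_eq_sorted_of_perm _ _ _ (fun a b h => h)
  apply (List.perm_ext_iff_of_nodup ?_ ?_).mpr
  · intro x
    rw [PySem.Set.mem_union, PySem.Set.mem_diff, memB]
    rw [mainA x (PySem.Set.ofList nums) (moveFrom.zip moveTo).reverse PySem.Set.empty PySem.Set.empty]
    simp [PySem.Set.empty]
  · exact PySem.Set.nodup_union _ _ (nodupA1 _ _ _ List.nodup_nil)
  · exact nodupB _ _ (PySem.Set.nodup_ofList _)
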